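-- pv_equiv track=rewrite | github.com/Dreadyyyy/advent-of-code-2024 | day8/task2.py | check
-- ===== SOURCE A (Python) =====
-- from math import gcd
--
-- def check(x: int, y: int, points: list[tuple[int, int]]) -> bool:
--     for i, (x1, y1) in enumerate(points[:-1]):
--         for x2, y2 in points[i + 1 :]:
--             dx1, dy1 = x - x1, y - y1
--             dx1, dy1 = dx1 // (n := gcd(dx1, dy1)), dy1 // n
--
--             dx2, dy2 = x1 - x2, y1 - y2
--             dx2, dy2 = dx2 // (n := gcd(dx2, dy2)), dy2 // n
--
--             if (dx1, dy1) == (dx2, dy2) or (-dx1, -dy1) == (dx2, dy2):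
--                 return True
--
--     return False
-- ===== SOURCE B (Python) =====
-- from math import gcd
--
-- def check(x: int, y: int, points: list[tuple[int, int]]) -> bool:
--     seen = set()
--     for px, py in points:
--         dx, dy = x - px, y - py
--         g = gcd(dx, dy)
--         dx, dy = dx // g, dy // g
--         if dx < 0 or (dx == 0 and dy < 0):
--             dx, dy = -dx, -dy
--         if (dx, dy) in seen:
--             return True
--         seen.add((dx, dy))
--     return False
-- ===== Notes on version B (the rewrite author's own statement) =====
-- stated objective: faster
-- what changed: replaces the O(n^2) scan over all point pairs by a single pass that canonicalizes the gcd-reduced direction from (x,y) to each point (fixing a sign) and detects a repeated direction with a hash set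
-- outside the precondition, e.g. on check(0, 0, [(1, 0), (2, 0), (2, 0)]): A returns True, B returns True; on check(0, 0, [(1, 0), (2, 0), (0, 0)]): A returns True, B returns True
import Mathlib
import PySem

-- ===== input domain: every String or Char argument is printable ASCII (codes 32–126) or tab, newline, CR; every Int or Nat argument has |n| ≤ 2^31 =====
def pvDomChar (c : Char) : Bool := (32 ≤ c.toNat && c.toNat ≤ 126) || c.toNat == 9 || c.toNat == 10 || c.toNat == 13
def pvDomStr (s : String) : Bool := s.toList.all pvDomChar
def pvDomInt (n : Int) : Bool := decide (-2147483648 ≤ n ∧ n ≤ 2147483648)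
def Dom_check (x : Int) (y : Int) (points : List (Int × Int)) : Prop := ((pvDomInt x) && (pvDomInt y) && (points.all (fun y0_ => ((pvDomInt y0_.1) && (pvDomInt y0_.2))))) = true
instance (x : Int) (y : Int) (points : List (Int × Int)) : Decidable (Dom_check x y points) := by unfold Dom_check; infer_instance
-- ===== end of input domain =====

-- B replaces A's O(n^2) pairwise scan with one pass hashing the sign-canonicalized reduced
-- direction from (x,y) to each point and reporting a duplicate (measured faster; asymptotic).

-- ===== PORT A =====
-- the body of A's inner loop for the pair (x1,y1), (x2,y2)
def pairCond (x y x1 y1 x2 y2 : Int) : Bool :=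
  let dx1 := x - x1
  let dy1 := y - y1
  let n1 : Int := Int.gcd dx1 dy1
  let rx1 := PySem.Int.floordiv dx1 n1
  let ry1 := PySem.Int.floordiv dy1 n1
  let dx2 := x1 - x2
  let dy2 := y1 - y2
  let n2 : Int := Int.gcd dx2 dy2
  let rx2 := PySem.Int.floordiv dx2 n2
  let ry2 := PySem.Int.floordiv dy2 n2
  ((rx1, ry1) == (rx2, ry2)) || ((-rx1, -ry1) == (rx2, ry2))

def check (x : Int) (y : Int) (points : List (Int × Int)) : Bool :=
  (PySem.List.enumerate (PySem.List.slice points none (some (-1))) 0).any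
    (fun ip =>
      (PySem.List.slice points (some (ip.1 + 1)) none).any
        (fun q => pairCond x y ip.2.1 ip.2.2 q.1 q.2))

-- ===== PORT B =====
-- reduced direction from (x,y) to (px,py), sign-canonicalized
def canonDir (x y px py : Int) : Int × Int :=
  let dx := x - px
  let dy := y - py
  let g : Int := Int.gcd dx dy
  let rx := PySem.Int.floordiv dx g
  let ry := PySem.Int.floordiv dy g
  if rx < 0 || (rx == 0 && ry < 0) then (-rx, -ry) else (rx, ry)

def altLoop (x y : Int) : List (Int × Int) → PySem.Set (Int × Int) → Bool
  | [], _ => false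
  | p :: t, seen =>
    let d := canonDir x y p.1 p.2
    if PySem.Set.contains seen d then true
    else altLoop x y t (PySem.Set.add seen d)

def check_alt (x : Int) (y : Int) (points : List (Int × Int)) : Bool :=
  altLoop x y points PySem.Set.empty

-- ===== PRECONDITION & SPEC =====
-- Pre_ excludes inputs where (x,y) is itself one of the points or the points contain duplicates:
-- there math.gcd(0,0) = 0 and A (depending on which pair its scan reaches first) raises
-- ZeroDivisionError, or returns early before reaching the degenerate pair.
def Pre_check (x : Int) (y : Int) (points : List (Int × Int)) : Prop :=
  (x, y) ∉ points ∧ points.Nodup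
instance (x : Int) (y : Int) (points : List (Int × Int)) : Decidable (Pre_check x y points) := by
  unfold Pre_check; infer_instance

def pvWitness_check : Int × Int × (List (Int × Int)) := (0, 0, [(1, 0), (2, 1)])

def Spec_check (x : Int) (y : Int) (points : List (Int × Int)) (out : Bool) : Prop := out = check_alt x y points
instance (x : Int) (y : Int) (points : List (Int × Int)) (out : Bool) : Decidable (Spec_check x y points out) := by unfold Spec_check; infer_instance

-- ===== CLAIM (what is proved, stated in full; the proofs are below) =====
def Claim_equal_check : Prop := ∀ (x : Int) (y : Int) (points : List (Int × Int)), Dom_check x y points → Pre_check x y points → Spec_check x y points (check x y points)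

-- ===== LEMMAS AND PROOFS =====



def red (a b : Int) : Int × Int := (a / (Int.gcd a b : Int), b / (Int.gcd a b : Int))

def NN (p : Int × Int) : Int × Int :=
  if p.1 < 0 ∨ (p.1 = 0 ∧ p.2 < 0) then (-p.1, -p.2) else p

theorem gcd_pos {a b : Int} (h : ¬(a = 0 ∧ b = 0)) : 0 < (Int.gcd a b : Int) := by
  have := Int.gcd_eq_zero_iff (a := a) (b := b); omega

theorem red_mul_left (a b : Int) : (red a b).1 * (Int.gcd a b : Int) = a :=
  Int.ediv_mul_cancel (Int.gcd_dvd_left ..)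

theorem red_mul_right (a b : Int) : (red a b).2 * (Int.gcd a b : Int) = b :=
  Int.ediv_mul_cancel (Int.gcd_dvd_right ..)

theorem red_gcd {a b : Int} (h : ¬(a = 0 ∧ b = 0)) :
    Int.gcd (red a b).1 (red a b).2 = 1 := by
  have hg : 0 < Int.gcd a b := by
    have := Int.gcd_eq_zero_iff (a := a) (b := b); omega
  exact Int.gcd_div_gcd_div_gcd hg

theorem prim_assoc {a b c d : Int} (ha : Int.gcd a b = 1) (hc : Int.gcd c d = 1)
    (h : a * d = b * c) : (a, b) = (c, d) ∨ (a, b) = (-c, -d) := by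
  have hab : IsCoprime a b := Int.isCoprime_iff_gcd_eq_one.mpr ha
  have hcd : IsCoprime c d := Int.isCoprime_iff_gcd_eq_one.mpr hc
  have hac : a ∣ c := hab.dvd_of_dvd_mul_left ⟨d, by linarith⟩
  have hca : c ∣ a := hcd.dvd_of_dvd_mul_left ⟨b, by linarith⟩
  rcases Int.associated_iff.mp (associated_of_dvd_dvd hac hca) with he | he
  · subst he
    by_cases h0 : a = 0
    · subst h0
      have hb : b = 1 ∨ b = -1 := by
        have : b.natAbs = 1 := by simpa [Int.gcd] using ha
        omega
      have hd : d = 1 ∨ d = -1 := by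
        have : d.natAbs = 1 := by simpa [Int.gcd] using hc
        omega
      rcases hb with hb | hb <;> rcases hd with hd | hd <;> subst hb <;> subst hd <;> simp
    · left
      have : d = b := by
        have := mul_left_cancel₀ h0 (by linarith : a * d = a * b)
        omega
      simp [this]
  · by_cases h0 : a = 0
    · have hc0 : c = 0 := by omega
      subst h0; subst hc0
      have hb : b = 1 ∨ b = -1 := by
        have : b.natAbs = 1 := by simpa [Int.gcd] using ha
        omega
      have hd : d = 1 ∨ d = -1 := by
        have : d.natAbs = 1 := by simpa [Int.gcd] using hc
        omega
      rcases hb with hb | hb <;> rcases hd with hd | hd <;> subst hb <;> subst hd <;> simp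
    · right
      have hc0 : c = -a := by omega
      subst hc0
      have hdb : d = -b := by
        have := mul_left_cancel₀ h0 (by linarith : a * d = a * (-b))
        omega
      simp [hdb]

theorem red_par_iff {a b c d : Int} (hab : ¬(a = 0 ∧ b = 0)) (hcd : ¬(c = 0 ∧ d = 0)) :
    (red a b = red c d ∨ red a b = (-(red c d).1, -(red c d).2)) ↔ a * d = b * c := by
  have hg1 : 0 < (Int.gcd a b : Int) := gcd_pos hab
  have hg2 : 0 < (Int.gcd c d : Int) := gcd_pos hcd
  have ea1 := red_mul_left a b
  have ea2 := red_mul_right a b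
  have ec1 := red_mul_left c d
  have ec2 := red_mul_right c d
  constructor
  · rintro (h | h)
    · have h1 : (red a b).1 = (red c d).1 := congrArg Prod.fst h
      have h2 : (red a b).2 = (red c d).2 := congrArg Prod.snd h
      calc a * d = ((red a b).1 * (Int.gcd a b : Int)) * ((red c d).2 * (Int.gcd c d : Int)) := by
              rw [ea1, ec2]
        _ = ((red a b).2 * (Int.gcd a b : Int)) * ((red c d).1 * (Int.gcd c d : Int)) := by
              rw [h1, h2]; ring
        _ = b * c := by rw [ea2, ec1]
    · have h1 : (red a b).1 = -(red c d).1 := congrArg Prod.fst h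
      have h2 : (red a b).2 = -(red c d).2 := congrArg Prod.snd h
      calc a * d = ((red a b).1 * (Int.gcd a b : Int)) * ((red c d).2 * (Int.gcd c d : Int)) := by
              rw [ea1, ec2]
        _ = ((red a b).2 * (Int.gcd a b : Int)) * ((red c d).1 * (Int.gcd c d : Int)) := by
              rw [h1, h2]; ring
        _ = b * c := by rw [ea2, ec1]
  · intro h
    have key : (red a b).1 * (red c d).2 = (red a b).2 * (red c d).1 := by
      have hmm : ((red a b).1 * (red c d).2) * ((Int.gcd a b : Int) * (Int.gcd c d : Int))
          = ((red a b).2 * (red c d).1) * ((Int.gcd a b : Int) * (Int.gcd c d : Int)) := by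
        calc ((red a b).1 * (red c d).2) * ((Int.gcd a b : Int) * (Int.gcd c d : Int))
            = ((red a b).1 * (Int.gcd a b : Int)) * ((red c d).2 * (Int.gcd c d : Int)) := by ring
          _ = a * d := by rw [ea1, ec2]
          _ = b * c := h
          _ = ((red a b).2 * (Int.gcd a b : Int)) * ((red c d).1 * (Int.gcd c d : Int)) := by
              rw [ea2, ec1]
          _ = ((red a b).2 * (red c d).1) * ((Int.gcd a b : Int) * (Int.gcd c d : Int)) := by ring
      exact mul_right_cancel₀ (by positivity) hmm
    have hpa := prim_assoc (red_gcd hab) (red_gcd hcd) key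
    simpa using hpa

theorem NN_neg {p : Int × Int} (h : p ≠ (0, 0)) : NN (-p.1, -p.2) = NN p := by
  obtain ⟨a, b⟩ := p
  simp only [NN] at *
  split_ifs with h1 h2 h2 <;> simp_all <;> omega

theorem NN_cases (p : Int × Int) : NN p = p ∨ NN p = (-p.1, -p.2) := by
  unfold NN; split_ifs <;> simp

theorem red_ne_zero {a b : Int} (h : ¬(a = 0 ∧ b = 0)) : red a b ≠ (0, 0) := by
  intro hz
  have e1 := red_mul_left a b
  have e2 := red_mul_right a b
  rw [hz] at e1 e2
  simp at e1 e2
  exact h ⟨e1.symm, e2.symm⟩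

theorem NN_eq_iff {p q : Int × Int} (hq : q ≠ (0, 0)) :
    NN p = NN q ↔ (p = q ∨ p = (-q.1, -q.2)) := by
  constructor
  · intro h
    rcases NN_cases p with hp1 | hp1 <;> rcases NN_cases q with hq1 | hq1 <;>
      rw [hp1, hq1] at h <;> [left; right; skip; skip]
    · exact h
    · exact h
    · right
      obtain ⟨p1, p2⟩ := p; obtain ⟨q1, q2⟩ := q
      simp only [Prod.mk.injEq] at h ⊢
      omega
    · left
      obtain ⟨p1, p2⟩ := p; obtain ⟨q1, q2⟩ := q
      simp only [Prod.mk.injEq] at h ⊢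
      omega
  · rintro (h | h)
    · rw [h]
    · rw [h, NN_neg hq]

theorem pairCond_iff {x y x1 y1 x2 y2 : Int}
    (h1 : ¬(x - x1 = 0 ∧ y - y1 = 0)) (h2 : ¬(x1 - x2 = 0 ∧ y1 - y2 = 0)) :
    (pairCond x y x1 y1 x2 y2 = true) ↔ (x - x1) * (y - y2) = (y - y1) * (x - x2) := by
  have hg1 := gcd_pos h1
  have hg2 := gcd_pos h2
  have e : (pairCond x y x1 y1 x2 y2 = true) ↔
      (red (x - x1) (y - y1) = red (x1 - x2) (y1 - y2) ∨
       red (x - x1) (y - y1) = (-(red (x1 - x2) (y1 - y2)).1, -(red (x1 - x2) (y1 - y2)).2)) := by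
    simp only [pairCond, red, PySem.Int.floordiv_eq_ediv_of_pos hg1,
      PySem.Int.floordiv_eq_ediv_of_pos hg2, Bool.or_eq_true, beq_iff_eq,
      Prod.ext_iff]
    constructor <;> rintro (⟨u, v⟩ | ⟨u, v⟩) <;> [left; right; left; right] <;> omega
  rw [e, red_par_iff h1 h2]
  constructor <;> intro hh <;> linear_combination hh

theorem canonDir_eq_NN {x y px py : Int} (h : ¬(x - px = 0 ∧ y - py = 0)) :
    canonDir x y px py = NN (red (x - px) (y - py)) := by
  have hg := gcd_pos h
  simp only [canonDir, NN, red, PySem.Int.floordiv_eq_ediv_of_pos hg, Bool.or_eq_true,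
    Bool.and_eq_true, decide_eq_true_eq, beq_iff_eq]

theorem canonDir_eq_iff {x y x1 y1 x2 y2 : Int}
    (h1 : ¬(x - x1 = 0 ∧ y - y1 = 0)) (h2 : ¬(x - x2 = 0 ∧ y - y2 = 0)) :
    (canonDir x y x1 y1 = canonDir x y x2 y2) ↔ (x - x1) * (y - y2) = (y - y1) * (x - x2) := by
  rw [canonDir_eq_NN h1, canonDir_eq_NN h2, NN_eq_iff (red_ne_zero h2), red_par_iff h1 h2]

theorem altLoop_iff (x y : Int) (l : List (Int × Int)) (seen : PySem.Set (Int × Int)) :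
    (altLoop x y l seen = true) ↔
      ((∃ p ∈ l, canonDir x y p.1 p.2 ∈ seen) ∨
        ¬ (l.map (fun p => canonDir x y p.1 p.2)).Nodup) := by
  induction l generalizing seen with
  | nil => simp [altLoop]
  | cons p t ih =>
    simp only [altLoop]
    split_ifs with hc
    · have hm : canonDir x y p.1 p.2 ∈ seen := (PySem.Set.contains_iff seen _).mp hc
      simp only [true_iff]
      exact Or.inl ⟨p, List.mem_cons_self .., hm⟩
    · rw [ih]
      have hcm : canonDir x y p.1 p.2 ∉ seen := fun hm =>
        hc ((PySem.Set.contains_iff seen _).mpr hm)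
      simp only [PySem.Set.mem_add, List.mem_cons, List.map_cons, List.nodup_cons, not_and_or,
        List.mem_map, not_not]
      constructor
      · rintro (⟨q, hq, hqs | hqc⟩ | hnd)
        · exact Or.inl ⟨q, Or.inr hq, hqs⟩
        · exact Or.inr (Or.inl ⟨q, hq, hqc⟩)
        · exact Or.inr (Or.inr hnd)
      · rintro (⟨q, hq | hq, hqs⟩ | ⟨q, hq, hqc⟩ | hnd)
        · exact absurd (hq ▸ hqs) hcm
        · exact Or.inl ⟨q, hq, Or.inl hqs⟩
        · exact Or.inl ⟨q, hq, Or.inr hqc⟩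
        · exact Or.inr hnd

theorem check_alt_iff (x y : Int) (pts : List (Int × Int)) :
    (check_alt x y pts = true) ↔
      ¬ (pts.map (fun p => canonDir x y p.1 p.2)).Nodup := by
  rw [check_alt, altLoop_iff]
  simp [PySem.Set.empty]

theorem check_iff (x y : Int) (pts : List (Int × Int)) :
    (check x y pts = true) ↔
      ∃ i j, ∃ (_hi : i < pts.length) (_hj : j < pts.length), i < j ∧
        pairCond x y (pts[i].1) (pts[i].2) (pts[j].1) (pts[j].2) = true := by
  rw [check, PySem.List.slice_to_neg_one, List.any_eq_true]
  constructor
  · rintro ⟨ip, hmem, hin⟩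
    obtain ⟨k, hk, rfl⟩ := (PySem.List.mem_enumerate_iff _ _ _).mp hmem
    have hcast : (0 : Int) + (k : Int) + 1 = ((k + 1 : Nat) : Int) := by push_cast; ring
    rw [List.any_eq_true] at hin
    obtain ⟨q, hq, hpc⟩ := hin
    rw [hcast, PySem.List.slice_from_natCast] at hq
    obtain ⟨m, hm, rfl⟩ := List.mem_iff_getElem.mp hq
    have hk' : k < pts.length - 1 := by simpa using hk
    have hm' : m < pts.length - (k + 1) := by simpa using hm
    refine ⟨k, k + 1 + m, by omega, by omega, by omega, ?_⟩
    have e1 : pts.dropLast[k] = pts[k]'(by omega) := List.getElem_dropLast hk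
    have e2 : (pts.drop (k + 1))[m] = pts[k + 1 + m]'(by omega) := List.getElem_drop
    rw [e1, e2] at hpc
    exact hpc
  · rintro ⟨i, j, hi, hj, hij, hpc⟩
    have hk : i < pts.dropLast.length := by simp; omega
    refine ⟨((0 : Int) + (i : Int), pts.dropLast[i]), ?_, ?_⟩
    · exact (PySem.List.mem_enumerate_iff _ _ _).mpr ⟨i, hk, rfl⟩
    · have hcast : (0 : Int) + (i : Int) + 1 = ((i + 1 : Nat) : Int) := by push_cast; ring
      rw [List.any_eq_true, hcast, PySem.List.slice_from_natCast]
      refine ⟨pts[j], ?_, ?_⟩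
      · apply List.mem_iff_getElem.mpr
        refine ⟨j - (i + 1), by simp; omega, ?_⟩
        rw [List.getElem_drop]
        congr 1
        omega
      · have e1 : pts.dropLast[i] = pts[i]'hi := List.getElem_dropLast hk
        rw [e1]
        exact hpc

theorem check_eq_alt (x y : Int) (pts : List (Int × Int)) (hxy : (x, y) ∉ pts)
    (hnd : pts.Nodup) : check x y pts = check_alt x y pts := by
  have hne1 : ∀ i (_ : i < pts.length), ¬(x - (pts[i].1) = 0 ∧ y - (pts[i].2) = 0) := by
    intro i hi hcontra
    apply hxy
    have he : (x, y) = pts[i] := Prod.ext_iff.mpr ⟨by omega, by omega⟩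
    rw [he]
    exact List.getElem_mem hi
  have hne2 : ∀ i j (_ : i < pts.length) (_ : j < pts.length), i < j →
      ¬((pts[i].1) - (pts[j].1) = 0 ∧ (pts[i].2) - (pts[j].2) = 0) := by
    intro i j hi hj hij hcontra
    have hne := List.pairwise_iff_getElem.mp hnd i j hi hj hij
    exact hne (Prod.ext_iff.mpr ⟨by omega, by omega⟩)
  have hiff : (check x y pts = true) ↔ (check_alt x y pts = true) := by
    rw [check_iff, check_alt_iff]
    constructor
    · rintro ⟨i, j, hi, hj, hij, hpc⟩
      intro hnodupmap
      have hgot := List.pairwise_iff_getElem.mp hnodupmap i j (by simpa using hi)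
        (by simpa using hj) hij
      simp only [List.getElem_map] at hgot
      apply hgot
      rw [canonDir_eq_iff (hne1 i hi) (hne1 j hj)]
      exact (pairCond_iff (hne1 i hi) (hne2 i j hi hj hij)).mp hpc
    · intro hnn
      have hx : ¬ ∀ (i j : Nat) (_hi : i < (pts.map (fun p => canonDir x y p.1 p.2)).length)
          (_hj : j < (pts.map (fun p => canonDir x y p.1 p.2)).length), i < j →
          (pts.map (fun p => canonDir x y p.1 p.2))[i] ≠
            (pts.map (fun p => canonDir x y p.1 p.2))[j] :=
        fun h => hnn (List.pairwise_iff_getElem.mpr h)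
      push Not at hx
      obtain ⟨i, j, hi, hj, hij, heq⟩ := hx
      have hi' : i < pts.length := by simpa using hi
      have hj' : j < pts.length := by simpa using hj
      simp only [List.getElem_map] at heq
      refine ⟨i, j, hi', hj', hij, ?_⟩
      rw [pairCond_iff (hne1 i hi') (hne2 i j hi' hj' hij)]
      rw [← canonDir_eq_iff (hne1 i hi') (hne1 j hj')]
      exact heq
  cases hA : check x y pts <;> cases hB : check_alt x y pts <;> simp_all

-- ===== VERDICT (by name: the statement is the Claim_ definition above) =====
theorem check_spec : Claim_equal_check := by
  intro x y pts _hdom hpre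
  exact check_eq_alt x y pts hpre.1 hpre.2
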